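-- pv_equiv track=rewrite | github.com/IAAR-Shanghai/SEAP | src/model_utils.py | create_task_type_mapping
-- ===== SOURCE A (Python) =====
-- from typing import List, Tuple, Dict, Any
--
-- def create_task_type_mapping(task_types: List[str]) -> Dict[str, int]:
--     """
--     Create a mapping from task type string to integer labels.
--
--     Args:
--         task_types (List[str]): List of task type strings.
--
--     Returns:
--         task_type_to_label (Dict[str, int]): Mapping of task type to integer labels.
--     """
--     task_type_to_label = {}
--     label_counter = 0
--     for ttype in task_types:
--         if ttype not in task_type_to_label:
--             task_type_to_label[ttype] = label_counter
--             label_counter += 1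
--     return task_type_to_label
-- ===== SOURCE B (Python) =====
-- from typing import List, Dict
--
-- def create_task_type_mapping(task_types: List[str]) -> Dict[str, int]:
--     # Stateless closed form: a first occurrence at position i gets label
--     # len(set(task_types[:i])) = number of distinct elements before it.
--     return {t: len(set(task_types[:i]))
--             for i, t in enumerate(task_types)
--             if t not in task_types[:i]}
-- ===== Notes on version B (the rewrite author's own statement) =====
-- stated objective: alternative
-- what changed: B replaces A's stateful single pass (mutable dict plus a running label counter) by a stateless per-element closed form: each first occurrence at position i is labeled independently as the number of distinct elements in the prefix task_types[:i], trading O(n) state-carrying iteration for an O(n^2) prefix-set computation.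
import Mathlib
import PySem

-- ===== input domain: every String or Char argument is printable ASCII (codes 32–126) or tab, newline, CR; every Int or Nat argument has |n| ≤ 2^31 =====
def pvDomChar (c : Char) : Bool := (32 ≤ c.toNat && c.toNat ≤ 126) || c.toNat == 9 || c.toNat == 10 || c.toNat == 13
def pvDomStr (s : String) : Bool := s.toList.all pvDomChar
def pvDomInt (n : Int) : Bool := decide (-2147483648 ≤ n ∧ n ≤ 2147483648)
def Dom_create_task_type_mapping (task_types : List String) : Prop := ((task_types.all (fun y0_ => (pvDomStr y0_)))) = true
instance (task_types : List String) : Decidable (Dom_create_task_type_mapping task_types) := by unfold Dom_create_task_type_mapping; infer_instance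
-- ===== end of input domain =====

-- B is a stateless per-element closed form (label = count of distinct earlier elements) instead of A's stateful scan; alternative decomposition, same return value.

-- ===== PORT A =====
-- A: one fused loop holding the dict and a running label counter.
def create_task_type_mapping (task_types : List String) : List (String × Int) :=
  let st := task_types.foldl
    (fun (st : PySem.Dict String Int × Int) ttype =>
      if st.1.contains ttype = false then (st.1.insert ttype st.2, st.2 + 1) else st)
    (PySem.Dict.empty, 0)
  st.1.items

-- ===== PORT B =====
-- B: {t: len(set(task_types[:i])) for i, t in enumerate(task_types) if t not in task_types[:i]}
def create_task_type_mapping_alt (task_types : List String) : List (String × Int) :=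
  ((PySem.List.enumerate task_types 0).foldl
    (fun (d : PySem.Dict String Int) p =>
      if p.2 ∈ PySem.List.slice task_types none (some p.1) then d
      else d.insert p.2
        ((PySem.Set.ofList (PySem.List.slice task_types none (some p.1))).length : Int))
    PySem.Dict.empty).items

-- ===== PRECONDITION & SPEC =====
def Spec_create_task_type_mapping (task_types : List String) (out : List (String × Int)) : Prop := out = create_task_type_mapping_alt task_types
instance (task_types : List String) (out : List (String × Int)) : Decidable (Spec_create_task_type_mapping task_types out) := by unfold Spec_create_task_type_mapping; infer_instance

-- ===== CLAIM (what is proved, stated in full; the proofs are below) =====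
def Claim_equal_create_task_type_mapping : Prop := ∀ (task_types : List String), Dom_create_task_type_mapping task_types → Spec_create_task_type_mapping task_types (create_task_type_mapping task_types)

-- ===== LEMMAS AND PROOFS =====

-- Common specification: first occurrences paired with the running count of distinct seen elements.
def pvSpec (xs : List String) (seen : List String) : List (String × Int) :=
  match xs with
  | [] => []
  | t :: rest => if t ∈ seen then pvSpec rest seen
                 else (t, (seen.length : Int)) :: pvSpec rest (seen ++ [t])

theorem pvOfList_append_singleton (pre : List String) (t : String) (h : t ∉ pre) :
    PySem.Set.ofList (pre ++ [t]) = PySem.Set.ofList pre ++ [t] := by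
  rw [PySem.Set.ofList_eq_foldl, PySem.Set.ofList_eq_foldl, List.foldl_append]
  simp [PySem.Set.add, PySem.Set.mem_ofList, h, ← PySem.Set.ofList_eq_foldl]

theorem pvLoopA (xs : List String) : ∀ (d : PySem.Dict String Int),
    (xs.foldl
      (fun (st : PySem.Dict String Int × Int) ttype =>
        if st.1.contains ttype = false then (st.1.insert ttype st.2, st.2 + 1) else st)
      (d, (d.keys.length : Int))).1.items
    = d.items ++ pvSpec xs d.keys := by
  induction xs with
  | nil => intro d; simp [pvSpec]
  | cons t rest ih =>
    intro d
    by_cases hm : t ∈ d.keys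
    · have h : d.contains t = true := (PySem.Dict.contains_iff_mem_keys d t).2 hm
      simp [List.foldl_cons, h, pvSpec, hm, ih]
    · have h : d.contains t = false := by
        rw [Bool.eq_false_iff]
        exact fun hc => hm ((PySem.Dict.contains_iff_mem_keys d t).1 hc)
      have hk := PySem.Dict.keys_insert_of_not_contains d (d.keys.length : Int) h
      have hlen : ((d.insert t (d.keys.length : Int)).keys.length : Int)
          = (d.keys.length : Int) + 1 := by rw [hk]; simp
      simp only [List.foldl_cons, h, if_true]
      rw [← hlen, ih, PySem.Dict.items_insert_of_not_contains d (d.keys.length : Int) h, hk]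
      simp [pvSpec, hm]

theorem pvLoopB (rest : List String) : ∀ (pre : List String) (d : PySem.Dict String Int)
    (ys : List String), ys = pre ++ rest → d.keys = PySem.Set.ofList pre →
    ((PySem.List.enumerate rest (pre.length : Int)).foldl
      (fun (d : PySem.Dict String Int) p =>
        if p.2 ∈ PySem.List.slice ys none (some p.1) then d
        else d.insert p.2 ((PySem.Set.ofList (PySem.List.slice ys none (some p.1))).length : Int))
      d).items
    = d.items ++ pvSpec rest (PySem.Set.ofList pre) := by
  induction rest with
  | nil => intro pre d ys _ _; simp [PySem.List.enumerate, pvSpec]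
  | cons t rs ih =>
    intro pre d ys hys hkeys
    have hslice : PySem.List.slice ys none (some (pre.length : Int)) = pre := by
      rw [PySem.List.slice_to_natCast, hys, List.take_left]
    have hstep : ((pre.length : Int) + 1) = (((pre ++ [t]).length : Nat) : Int) := by
      simp
    rw [PySem.List.enumerate_cons]
    simp only [List.foldl_cons]
    rw [hslice]
    by_cases hm : t ∈ pre
    · have hmem : t ∈ PySem.Set.ofList pre := (PySem.Set.mem_ofList pre t).2 hm
      have hofl : PySem.Set.ofList (pre ++ [t]) = PySem.Set.ofList pre := by
        rw [PySem.Set.ofList_eq_foldl, List.foldl_append]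
        simp [PySem.Set.add, ← PySem.Set.ofList_eq_foldl, hmem]
      rw [if_pos hm]
      rw [hstep, ih (pre ++ [t]) d ys (by simpa using hys) (by rw [hkeys, hofl]), hofl]
      simp [pvSpec, hmem]
    · have hmem : t ∉ PySem.Set.ofList pre := fun hc => hm ((PySem.Set.mem_ofList pre t).1 hc)
      have hnc : d.contains t = false := by
        rw [Bool.eq_false_iff]
        intro hc
        exact hmem (hkeys ▸ (PySem.Dict.contains_iff_mem_keys d t).1 hc)
      have hofl := pvOfList_append_singleton pre t hm
      rw [if_neg hm]
      rw [hstep, ih (pre ++ [t]) _ ys (by simpa using hys)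
            (by rw [PySem.Dict.keys_insert_of_not_contains d _ hnc, hkeys, hofl]),
          PySem.Dict.items_insert_of_not_contains d _ hnc, hofl]
      simp [pvSpec, hmem]

-- ===== VERDICT (by name: the statement is the Claim_ definition above) =====
theorem create_task_type_mapping_spec : Claim_equal_create_task_type_mapping := by
  intro xs _
  unfold Spec_create_task_type_mapping create_task_type_mapping create_task_type_mapping_alt
  have hA := pvLoopA xs PySem.Dict.empty
  have hB := pvLoopB xs [] PySem.Dict.empty xs (by simp) (by simp [PySem.Set.ofList])
  simp only [PySem.Dict.keys_empty, List.length_nil, Int.natCast_zero] at hA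
  simp only [List.length_nil, Int.natCast_zero] at hB
  rw [hA, hB]
  simp [PySem.Dict.empty, PySem.Set.ofList]
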